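-- pv_equiv track=rewrite | github.com/aetandrianwr/next_loc_clean_v2 | scripts/experiment_V1/exp7_recency/run_experiment.py | categorize_by_last_visit_recency
-- ===== SOURCE A (Python) =====
-- from collections import defaultdict, Counter
--
-- def categorize_by_last_visit_recency(test_data, recency_info):
--     """Group samples by recency of last visit."""
--     groups = defaultdict(list)
--
--     recency_bins = [
--         ('Same Day (0)', 0, 1),
--         ('1 Day Ago', 1, 2),
--         ('2-3 Days Ago', 2, 4),
--         ('4-7 Days Ago', 4, 8),
--         ('> 7 Days Ago', 8, 100),
--     ]
--
--     for info in recency_info: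
--         last_diff = info['last_visit_diff']
--
--         for bin_name, low, high in recency_bins:
--             if low <= last_diff < high:
--                 groups[bin_name].append(info['idx'])
--                 break
--
--     return groups, recency_bins
-- ===== SOURCE B (Python) =====
-- from collections import defaultdict
--
-- def categorize_by_last_visit_recency(test_data, recency_info):
--     """Group samples by recency of last visit.
--
--     Closed-form binning: for 0 <= d < 100 the matching bin index is
--     min(d.bit_length(), 4) (boundaries 0,1,2,4,8 are powers of two),
--     so no inner scan over the bins is needed.
--     """
--     recency_bins = [
--         ('Same Day (0)', 0, 1),
--         ('1 Day Ago', 1, 2),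
--         ('2-3 Days Ago', 2, 4),
--         ('4-7 Days Ago', 4, 8),
--         ('> 7 Days Ago', 8, 100),
--     ]
--     groups = defaultdict(list)
--     for info in recency_info:
--         d = info['last_visit_diff']
--         if 0 <= d < 100:
--             name = recency_bins[min(d.bit_length(), 4)][0]
--             groups[name].append(info['idx'])
--     return groups, recency_bins
-- ===== Notes on version B (the rewrite author's own statement) =====
-- stated objective: alternative
-- what changed: Replaces the inner first-match scan over the bin list by a closed-form bin index min(d.bit_length(), 4), exploiting that the bin boundaries 0,1,2,4,8 are consecutive powers of two; one arithmetic step per sample instead of a nested loop.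
import Mathlib
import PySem

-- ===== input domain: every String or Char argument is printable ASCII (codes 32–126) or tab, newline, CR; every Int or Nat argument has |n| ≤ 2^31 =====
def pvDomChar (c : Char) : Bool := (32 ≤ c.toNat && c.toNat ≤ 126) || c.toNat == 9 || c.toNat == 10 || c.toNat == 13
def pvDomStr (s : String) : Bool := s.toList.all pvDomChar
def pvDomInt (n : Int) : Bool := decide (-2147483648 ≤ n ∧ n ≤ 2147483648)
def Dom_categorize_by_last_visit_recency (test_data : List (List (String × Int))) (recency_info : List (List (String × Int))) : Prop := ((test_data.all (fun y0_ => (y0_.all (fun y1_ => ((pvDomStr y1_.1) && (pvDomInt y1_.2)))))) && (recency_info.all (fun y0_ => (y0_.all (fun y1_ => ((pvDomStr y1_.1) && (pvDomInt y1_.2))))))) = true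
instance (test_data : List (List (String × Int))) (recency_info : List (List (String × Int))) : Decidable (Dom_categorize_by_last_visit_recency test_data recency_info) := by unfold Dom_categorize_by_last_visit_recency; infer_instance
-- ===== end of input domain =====

-- B replaces A's inner first-match scan over the bin list by the closed-form bin
-- index min(bit_length, 4); same return value, including dict insertion order.

-- ===== PORT A =====
-- the recency_bins literal (shared constant of both programs)
def pvBins : List (String × Int × Int) :=
  [("Same Day (0)", 0, 1), ("1 Day Ago", 1, 2), ("2-3 Days Ago", 2, 4),
   ("4-7 Days Ago", 4, 8), ("> 7 Days Ago", 8, 100)]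

-- A's inner 'for bin_name, low, high in recency_bins: … break' loop
def pvBinScanA (groups : PySem.Dict String (List Int)) (info : PySem.Dict String Int)
    (lastDiff : Int) : List (String × Int × Int) → PySem.Dict String (List Int)
  | [] => groups
  | (binName, low, high) :: rest =>
      if low ≤ lastDiff ∧ lastDiff < high then
        groups.insert binName (groups.getD binName [] ++ [(info.get? "idx").getD 0])
      else pvBinScanA groups info lastDiff rest

def categorize_by_last_visit_recency (test_data : List (List (String × Int))) (recency_info : List (List (String × Int))) : (List (String × List Int)) × (List (String × Int × Int)) :=
  let groups := recency_info.foldl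
    (fun groups info =>
      let d := PySem.Dict.mk info
      -- info['last_visit_diff'] raises KeyError when absent: Pre_ excludes that, default never used
      let lastDiff := (d.get? "last_visit_diff").getD 0
      pvBinScanA groups d lastDiff pvBins)
    PySem.Dict.empty
  (groups.items, pvBins)

-- ===== PORT B =====
def categorize_by_last_visit_recency_alt (test_data : List (List (String × Int))) (recency_info : List (List (String × Int))) : (List (String × List Int)) × (List (String × Int × Int)) :=
  let groups := recency_info.foldl
    (fun groups info =>
      let d := ((PySem.Dict.mk info).get? "last_visit_diff").getD 0
      if 0 ≤ d ∧ d < 100 then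
        let name := ((PySem.List.pyGet? pvBins (Int.ofNat (min (PySem.Int.bitLength d) 4))).getD ("", 0, 0)).1
        groups.insert name (groups.getD name [] ++ [((PySem.Dict.mk info).get? "idx").getD 0])
      else groups)
    PySem.Dict.empty
  (groups.items, pvBins)

-- ===== PRECONDITION & SPEC =====
-- Pre_ excludes exactly the inputs on which A raises KeyError: a sample dict missing
-- 'last_visit_diff', or missing 'idx' while its last_visit_diff falls in some bin.
def Pre_categorize_by_last_visit_recency (test_data : List (List (String × Int))) (recency_info : List (List (String × Int))) : Prop :=
  ∀ info ∈ recency_info,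
    (PySem.Dict.mk info).get? "last_visit_diff" ≠ none ∧
    ((0 ≤ ((PySem.Dict.mk info).get? "last_visit_diff").getD 0 ∧
      ((PySem.Dict.mk info).get? "last_visit_diff").getD 0 < 100) →
      (PySem.Dict.mk info).get? "idx" ≠ none)
instance (test_data : List (List (String × Int))) (recency_info : List (List (String × Int))) : Decidable (Pre_categorize_by_last_visit_recency test_data recency_info) := by unfold Pre_categorize_by_last_visit_recency; infer_instance
def pvWitness_categorize_by_last_visit_recency : (List (List (String × Int))) × (List (List (String × Int))) :=
  ([], [[("last_visit_diff", 2), ("idx", 7)], [("last_visit_diff", 120)]])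

def Spec_categorize_by_last_visit_recency (test_data : List (List (String × Int))) (recency_info : List (List (String × Int))) (out : (List (String × List Int)) × (List (String × Int × Int))) : Prop := out = categorize_by_last_visit_recency_alt test_data recency_info
instance (test_data : List (List (String × Int))) (recency_info : List (List (String × Int))) (out : (List (String × List Int)) × (List (String × Int × Int))) : Decidable (Spec_categorize_by_last_visit_recency test_data recency_info out) := by unfold Spec_categorize_by_last_visit_recency; infer_instance

-- ===== CLAIM (what is proved, stated in full; the proofs are below) =====
def Claim_equal_categorize_by_last_visit_recency : Prop := ∀ (test_data : List (List (String × Int))) (recency_info : List (List (String × Int))), Dom_categorize_by_last_visit_recency test_data recency_info → Pre_categorize_by_last_visit_recency test_data recency_info → Spec_categorize_by_last_visit_recency test_data recency_info (categorize_by_last_visit_recency test_data recency_info)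

-- ===== LEMMAS AND PROOFS =====

lemma pvBitLength_eq (d : Int) (k : Nat) (h1 : (2:Nat) ^ k ≤ d.natAbs)
    (h2 : d.natAbs < 2 ^ (k + 1)) : PySem.Int.bitLength d = k + 1 := by
  have hne : d ≠ 0 := by
    intro h; subst h; simp at h1
  have hu := PySem.Int.lt_two_pow_bitLength d
  have hl := PySem.Int.two_pow_bitLength_le d hne
  have hk : k < PySem.Int.bitLength d :=
    (Nat.pow_lt_pow_iff_right one_lt_two).mp (lt_of_le_of_lt h1 hu)
  have hk2 : PySem.Int.bitLength d - 1 < k + 1 :=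
    (Nat.pow_lt_pow_iff_right one_lt_two).mp (lt_of_le_of_lt hl h2)
  omega

lemma pvStep_eq (groups : PySem.Dict String (List Int)) (info : PySem.Dict String Int) (d : Int) :
    pvBinScanA groups info d pvBins =
      (if 0 ≤ d ∧ d < 100 then
        groups.insert ((PySem.List.pyGet? pvBins (Int.ofNat (min (PySem.Int.bitLength d) 4))).getD ("", 0, 0)).1
          (groups.getD ((PySem.List.pyGet? pvBins (Int.ofNat (min (PySem.Int.bitLength d) 4))).getD ("", 0, 0)).1 [] ++
            [(info.get? "idx").getD 0])
      else groups) := by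
  by_cases h0 : 0 ≤ d ∧ d < 100
  · rcases h0 with ⟨hl, hh⟩
    rcases lt_or_ge d 1 with h | h
    · have hd : d = 0 := by omega
      subst hd
      rw [show ((PySem.List.pyGet? pvBins (Int.ofNat (min (PySem.Int.bitLength 0) 4))).getD ("", 0, 0)).1 = "Same Day (0)" from by decide]
      simp only [pvBinScanA, pvBins]
      split_ifs <;> first | rfl | omega
    rcases lt_or_ge d 2 with h2 | h2
    · have hd : d = 1 := by omega
      subst hd
      rw [show ((PySem.List.pyGet? pvBins (Int.ofNat (min (PySem.Int.bitLength 1) 4))).getD ("", 0, 0)).1 = "1 Day Ago" from by decide]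
      simp only [pvBinScanA, pvBins]
      split_ifs <;> first | rfl | omega
    rcases lt_or_ge d 4 with h4 | h4
    · have hb : PySem.Int.bitLength d = 2 := pvBitLength_eq d 1 (by omega) (by omega)
      rw [show ((PySem.List.pyGet? pvBins (Int.ofNat (min (PySem.Int.bitLength d) 4))).getD ("", 0, 0)).1 = "2-3 Days Ago" from by rw [hb]; decide]
      simp only [pvBinScanA, pvBins]
      split_ifs <;> first | rfl | omega
    rcases lt_or_ge d 8 with h8 | h8
    · have hb : PySem.Int.bitLength d = 3 := pvBitLength_eq d 2 (by omega) (by omega)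
      rw [show ((PySem.List.pyGet? pvBins (Int.ofNat (min (PySem.Int.bitLength d) 4))).getD ("", 0, 0)).1 = "4-7 Days Ago" from by rw [hb]; decide]
      simp only [pvBinScanA, pvBins]
      split_ifs <;> first | rfl | omega
    · have hb : 4 ≤ PySem.Int.bitLength d := by
        have hu := PySem.Int.lt_two_pow_bitLength d
        by_contra hc
        have : (2:Nat) ^ PySem.Int.bitLength d ≤ 2 ^ 3 :=
          Nat.pow_le_pow_right (by omega) (by omega)
        omega
      have hmin : min (PySem.Int.bitLength d) 4 = 4 := by omega
      rw [show ((PySem.List.pyGet? pvBins (Int.ofNat (min (PySem.Int.bitLength d) 4))).getD ("", 0, 0)).1 = "> 7 Days Ago" from by rw [hmin]; decide]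
      simp only [pvBinScanA, pvBins]
      split_ifs <;> first | rfl | omega
  · simp only [pvBinScanA, pvBins]
    split_ifs <;> first | rfl | omega

-- ===== VERDICT (by name: the statement is the Claim_ definition above) =====
theorem categorize_by_last_visit_recency_spec : Claim_equal_categorize_by_last_visit_recency := by
  intro test_data recency_info _ _
  show _ = _
  simp only [categorize_by_last_visit_recency, categorize_by_last_visit_recency_alt]
  have hfun : (fun (groups : PySem.Dict String (List Int)) (info : List (String × Int)) =>
      pvBinScanA groups (PySem.Dict.mk info) (((PySem.Dict.mk info).get? "last_visit_diff").getD 0) pvBins)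
      = (fun (groups : PySem.Dict String (List Int)) (info : List (String × Int)) =>
        let d := ((PySem.Dict.mk info).get? "last_visit_diff").getD 0
        if 0 ≤ d ∧ d < 100 then
          let name := ((PySem.List.pyGet? pvBins (Int.ofNat (min (PySem.Int.bitLength d) 4))).getD ("", 0, 0)).1
          groups.insert name (groups.getD name [] ++ [((PySem.Dict.mk info).get? "idx").getD 0])
        else groups) := by
    funext groups info
    exact pvStep_eq groups (PySem.Dict.mk info) _
  rw [hfun]
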